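-- pv_equiv track=rewrite | github.com/j-ij-i/Algorithm | Python/PGS_최고의 집합.py | solution
-- ===== SOURCE A (Python) =====
-- def solution(n, s):
--     answer = [s//n] * n
--     rem = s%n
--
--     for i in range(rem):
--         answer[i] +=1
--     answer.sort()
--
--     if answer[0] == 0:
--         return [-1]
--     else:
--         return answer
-- ===== SOURCE B (Python) =====
-- def solution(n, s):
--     # Greedy sequential extraction: each step takes the floor of the remaining
--     # sum over the remaining slot count, which is the smallest element of an
--     # optimal near-equal split; the list comes out sorted with no sort call.
--     answer = []
--     k, t = n, s
--     while k > 0: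
--         m = t // k
--         answer.append(m)
--         t -= m
--         k -= 1
--     if answer[0] == 0:
--         return [-1]
--     return answer
-- ===== Notes on version B (the rewrite author's own statement) =====
-- stated objective: alternative
-- what changed: B replaces A's build-uniform-list/bump-prefix/sort strategy with a greedy single pass that repeatedly emits floor(remaining sum / remaining slots) and subtracts it, producing the list already sorted with no mutation of a prebuilt list and no sort.
import Mathlib
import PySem

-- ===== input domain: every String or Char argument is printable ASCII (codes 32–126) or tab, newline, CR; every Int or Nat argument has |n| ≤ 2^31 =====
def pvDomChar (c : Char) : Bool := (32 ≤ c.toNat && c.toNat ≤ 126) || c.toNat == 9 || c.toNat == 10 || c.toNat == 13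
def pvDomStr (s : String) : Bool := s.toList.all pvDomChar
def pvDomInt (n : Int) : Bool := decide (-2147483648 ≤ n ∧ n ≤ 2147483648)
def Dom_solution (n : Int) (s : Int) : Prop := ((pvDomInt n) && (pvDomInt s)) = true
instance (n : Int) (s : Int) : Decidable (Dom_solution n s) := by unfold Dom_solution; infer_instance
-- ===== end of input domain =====

-- B replaces A's "uniform list, bump a prefix, sort" by a greedy single pass that emits
-- floor(remaining sum / remaining slots) each step; the output is sorted as produced.

-- ===== PORT A =====
-- Python's answer is a mutable array: ported as Array Int (O(1) index get/set like Python's list);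
-- answer.sort() is ported as the standard-library stable ascending sort List.mergeSort (the same
-- values Python's stable sort returns).
def solution (n : Int) (s : Int) : List Int :=
  let answer := Array.replicate n.toNat (PySem.Int.floordiv s n)   -- [s//n] * n
  let rem := PySem.Int.mod s n                                     -- s % n
  let answer := (PySem.List.pyRange 0 rem 1).foldl                 -- for i in range(rem): answer[i] += 1
      (fun acc i => acc.set! i.toNat (acc[i.toNat]! + 1)) answer
  let answer := List.mergeSort answer.toList (fun a b => a ≤ b)    -- answer.sort()
  match PySem.List.pyGet? answer 0 with                            -- answer[0]
  | some x => if x = 0 then [-1] else answer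
  | none => []   -- Python raises IndexError here (only reachable for n ≤ 0, outside Pre_)

-- ===== PORT B =====
-- the 'while k > 0' loop, as tail recursion on k (entered only for k > 0, so k is a Nat here);
-- answer.append(m) is the usual accumulator cons with one final reverse
def solnAltLoop : Nat → Int → List Int → List Int
  | 0, _, acc => acc.reverse
  | Nat.succ k, t, acc =>
    let m := PySem.Int.floordiv t ((k : Int) + 1)   -- m = t // k
    solnAltLoop k (t - m) (m :: acc)                 -- answer.append(m); t -= m; k -= 1

def solution_alt (n : Int) (s : Int) : List Int :=
  let answer := solnAltLoop n.toNat s []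
  match PySem.List.pyGet? answer 0 with              -- answer[0]
  | some x => if x = 0 then [-1] else answer
  | none => []   -- Python raises IndexError here (only reachable for n ≤ 0, outside Pre_)

-- ===== PRECONDITION & SPEC =====
-- Pre_ excludes exactly the inputs where A raises: n = 0 (ZeroDivisionError) and n < 0 (IndexError on []).
def Pre_solution (n : Int) (s : Int) : Prop := 1 ≤ n
instance (n : Int) (s : Int) : Decidable (Pre_solution n s) := by unfold Pre_solution; infer_instance
def pvWitness_solution : Int × Int := (3, 7)
def Spec_solution (n : Int) (s : Int) (out : List Int) : Prop := out = solution_alt n s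
instance (n : Int) (s : Int) (out : List Int) : Decidable (Spec_solution n s out) := by unfold Spec_solution; infer_instance

-- ===== CLAIM (what is proved, stated in full; the proofs are below) =====
def Claim_equal_solution : Prop := ∀ (n : Int) (s : Int), Dom_solution n s → Pre_solution n s → Spec_solution n s (solution n s)

-- ===== LEMMAS AND PROOFS =====

-- A's bump loop turns [q]*N into [q+1]*k ++ [q]*(N-k) after k iterations.
lemma loop_bump (q : Int) (N : Nat) : ∀ k : Nat, k ≤ N →
    ((PySem.List.pyRange 0 (k : Int) 1).foldl
      (fun acc i => acc.set! i.toNat (acc[i.toNat]! + 1))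
      (Array.replicate N q)).toList
    = List.replicate k (q + 1) ++ List.replicate (N - k) q := by
  intro k
  induction k with
  | zero => intro _; simp [PySem.List.pyRange_one_eq_nil]
  | succ k ih =>
    intro hk
    have h1 : ((k : Int) + 1) = ((k + 1 : Nat) : Int) := by push_cast; ring
    rw [← h1, PySem.List.pyRange_one_succ_right (by positivity), List.foldl_append]
    set A := (PySem.List.pyRange 0 (k : Int) 1).foldl
      (fun acc i => acc.set! i.toNat (acc[i.toNat]! + 1)) (Array.replicate N q) with hA
    have hL : A.toList = List.replicate k (q + 1) ++ List.replicate (N - k) q := ih (by omega)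
    have hsize : k < A.size := by
      have : A.size = A.toList.length := (Array.length_toList).symm
      rw [this, hL]; simp; omega
    have hNk : N - k = (N - (k + 1)) + 1 := by omega
    have hgetL : A.toList[k]! = q := by
      rw [hL, hNk, List.replicate_succ]
      rw [getElem!_pos _ k (by simp)]
      simp
    have hget : ((k : Int).toNat) = k := by simp
    simp only [List.foldl_cons, List.foldl_nil, hget]
    rw [getElem!_pos A k hsize]
    have : A[k] = A.toList[k]! := by
      rw [getElem!_pos _ k (by rw [Array.length_toList]; exact hsize)]
      simp
    rw [this, hgetL]
    simp only [Array.set!_eq_setIfInBounds, Array.toList_setIfInBounds, hL]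
    rw [hNk, List.replicate_succ, List.replicate_succ']
    rw [List.set_append_right _ _ (by simp)]
    simp

-- B's greedy loop produces the near-equal split in sorted order.
lemma greedy_eq (k : Nat) : ∀ (t : Int) (acc : List Int),
    solnAltLoop (k + 1) t acc
    = acc.reverse
      ++ List.replicate ((k + 1) - (PySem.Int.mod t ((k : Int) + 1)).toNat)
        (PySem.Int.floordiv t ((k : Int) + 1))
      ++ List.replicate ((PySem.Int.mod t ((k : Int) + 1)).toNat)
        (PySem.Int.floordiv t ((k : Int) + 1) + 1) := by
  induction k with
  | zero =>
    intro t acc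
    have h0 : PySem.Int.mod t 1 = 0 := by
      have h1 := PySem.Int.mod_nonneg t (b := 1) (by omega)
      have h2 := PySem.Int.mod_lt t (b := 1) (by omega)
      omega
    simp [solnAltLoop]
  | succ k ih =>
    intro t acc
    simp only [Nat.cast_add, Nat.cast_one]
    set b : Int := (k : Int) + 1 + 1 with hb
    have hbpos : (0 : Int) < b := by positivity
    set q := PySem.Int.floordiv t b with hq
    set r := PySem.Int.mod t b with hrdef
    have hr0 : 0 ≤ r := PySem.Int.mod_nonneg t hbpos
    have hrb : r < b := PySem.Int.mod_lt t hbpos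
    have hid : q * b + r = t := PySem.Int.floordiv_mul_add_mod t b
    show solnAltLoop (k + 1) (t - q) (q :: acc) = _
    by_cases hcase : r = (k : Int) + 1
    · -- last slot of the bump: t - q = (q+1)*(k+1), the recursive call yields all (q+1)s
      have hfd : PySem.Int.floordiv (t - q) ((k : Int) + 1) = q + 1 := by
        rw [PySem.Int.floordiv_eq_iff_of_pos (by positivity)]
        constructor <;> nlinarith
      have hmd : PySem.Int.mod (t - q) ((k : Int) + 1) = 0 := by
        have := PySem.Int.floordiv_mul_add_mod (t - q) ((k : Int) + 1)
        rw [hfd] at this; nlinarith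
      rw [ih (t - q) (q :: acc), hfd, hmd]
      have hrt : r.toNat = k + 1 := by omega
      rw [hrt]
      simp [List.replicate_succ]
    · -- ordinary step: quotient and remainder are unchanged
      have hrk : r < (k : Int) + 1 := by omega
      have hfd : PySem.Int.floordiv (t - q) ((k : Int) + 1) = q := by
        rw [PySem.Int.floordiv_eq_iff_of_pos (by positivity)]
        constructor <;> nlinarith
      have hmd : PySem.Int.mod (t - q) ((k : Int) + 1) = r := by
        have := PySem.Int.floordiv_mul_add_mod (t - q) ((k : Int) + 1)
        rw [hfd] at this; nlinarith
      rw [ih (t - q) (q :: acc), hfd, hmd]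
      have hcount : (k + 1 + 1) - r.toNat = ((k + 1) - r.toNat) + 1 := by omega
      rw [hcount, List.replicate_succ]
      simp

theorem solution_spec : Claim_equal_solution := by
  intro n s _ hpre
  unfold Spec_solution solution solution_alt
  dsimp only
  have hn : (0 : Int) < n := hpre
  set q := PySem.Int.floordiv s n with hq
  set r := PySem.Int.mod s n with hr
  have hr0 : 0 ≤ r := PySem.Int.mod_nonneg s hn
  have hrn : r < n := PySem.Int.mod_lt s hn
  -- B's side: the greedy loop yields the sorted split directly
  have hnN : n.toNat = (n.toNat - 1) + 1 := by omega
  have hcast : ((n.toNat - 1 : Nat) : Int) + 1 = n := by omega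
  have hBlist : solnAltLoop n.toNat s []
      = List.replicate (n.toNat - r.toNat) q ++ List.replicate r.toNat (q + 1) := by
    rw [hnN, greedy_eq (n.toNat - 1) s [], hcast, ← hq, ← hr]
    simp
  -- A's side: bump then sort yields the same list
  have hk : r = ((r.toNat : Nat) : Int) := by omega
  have hkN : r.toNat ≤ n.toNat := by omega
  rw [hk, loop_bump q n.toNat r.toNat hkN]
  have hsorted : List.mergeSort
      (List.replicate r.toNat (q + 1) ++ List.replicate (n.toNat - r.toNat) q)
      (fun a b => a ≤ b)
      = List.replicate (n.toNat - r.toNat) q ++ List.replicate r.toNat (q + 1) := by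
    apply List.Perm.eq_of_pairwise (le := (· ≤ · : Int → Int → Prop))
    · intro a b _ _ h1 h2; omega
    · have := List.pairwise_mergeSort (le := fun a b : Int => decide (a ≤ b))
        (by intro a b c h1 h2; simp only [decide_eq_true_eq] at *; omega)
        (by intro a b; simp only [Bool.or_eq_true, decide_eq_true_eq]; omega)
        (List.replicate r.toNat (q + 1) ++ List.replicate (n.toNat - r.toNat) q)
      simpa using this
    · refine List.pairwise_append.mpr ⟨?_, ?_, ?_⟩
      · exact List.pairwise_replicate.mpr (Or.inr le_rfl)
      · exact List.pairwise_replicate.mpr (Or.inr le_rfl)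
      · intro a ha b hb
        rw [List.eq_of_mem_replicate ha, List.eq_of_mem_replicate hb]
        omega
    · exact (List.mergeSort_perm _ _).trans List.perm_append_comm
  rw [hsorted, hBlist]
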